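-- pv_equiv track=rewrite | github.com/ShivamS-07/agent-service-sandbox | agent_service/utils/earnings/earnings_util.py | group_neighboring_lines
-- ===== SOURCE A (Python) =====
-- from typing import Dict, List, Optional, Set, Tuple
--
-- def group_neighboring_lines(line_nums: List[int]) -> List[List[int]]:
--     if not line_nums:
--         return []
--
--     result = []
--     current_group = [line_nums[0]]
--
--     for i in range(1, len(line_nums)):
--         if line_nums[i] == line_nums[i - 1] + 1:
--             current_group.append(line_nums[i])
--         else:
--             result.append(current_group)
--             current_group = [line_nums[i]]
--
--     result.append(current_group)  # Append the last group
--     return result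
-- ===== SOURCE B (Python) =====
-- from itertools import groupby
--
--
-- def group_neighboring_lines(line_nums):
--     return [
--         [v for _, v in g]
--         for _, g in groupby(enumerate(line_nums), key=lambda t: t[1] - t[0])
--     ]
-- ===== Notes on version B (the rewrite author's own statement) =====
-- stated objective: idiomatic
-- what changed: Replaces A's index loop with a mutable result/current_group accumulator by a single itertools.groupby over enumerate(line_nums) keyed on value-minus-index, which is constant exactly on consecutive runs.
import Mathlib
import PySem

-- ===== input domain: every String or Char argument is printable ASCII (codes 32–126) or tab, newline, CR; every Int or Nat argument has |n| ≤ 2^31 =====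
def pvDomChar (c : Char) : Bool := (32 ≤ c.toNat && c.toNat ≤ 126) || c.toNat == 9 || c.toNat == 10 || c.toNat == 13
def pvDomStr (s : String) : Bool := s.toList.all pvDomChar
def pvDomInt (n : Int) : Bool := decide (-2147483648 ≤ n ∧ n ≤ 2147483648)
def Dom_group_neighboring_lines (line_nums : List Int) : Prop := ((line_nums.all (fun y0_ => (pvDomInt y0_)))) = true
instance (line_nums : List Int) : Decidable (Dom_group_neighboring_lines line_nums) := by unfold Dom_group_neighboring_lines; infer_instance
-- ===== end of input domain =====

-- B groups runs via itertools.groupby over enumerate with key value-minus-index, instead of A's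
-- index loop with a mutable current-group accumulator (objective: idiomatic; same cost).


-- ===== PORT A =====
-- loop body of A's for-loop (state = (result, current_group))
def stepA (l : List Int) (st : List (List Int) × List Int) (i : Int) :
    List (List Int) × List Int :=
  if PySem.List.pyGetD l i 0 = PySem.List.pyGetD l (i - 1) 0 + 1 then
    (st.1, st.2 ++ [PySem.List.pyGetD l i 0])
  else
    (st.1 ++ [st.2], [PySem.List.pyGetD l i 0])

def group_neighboring_lines (line_nums : List Int) : List (List Int) :=
  match line_nums with
  | [] => []
  | x :: _ =>
    let st := (PySem.List.pyRange 1 (line_nums.length : Int) 1).foldl (stepA line_nums) ([], [x])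
    st.1 ++ [st.2]

-- ===== PORT B =====
-- take the prefix of enumerated pairs whose key (value − index) equals k, as groupby does
def pvSpan (k : Int) : List (Int × Int) → List (Int × Int) × List (Int × Int)
  | [] => ([], [])
  | p :: ps =>
    if p.2 - p.1 = k then
      let r := pvSpan k ps
      (p :: r.1, r.2)
    else ([], p :: ps)

theorem pvSpan_snd_length (k : Int) (ps : List (Int × Int)) :
    (pvSpan k ps).2.length ≤ ps.length := by
  induction ps with
  | nil => simp [pvSpan]
  | cons p ps ih =>
    simp only [pvSpan]
    split
    · exact le_trans ih (Nat.le_succ _)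
    · simp

def pvGroups : List (Int × Int) → List (List Int)
  | [] => []
  | p :: ps =>
    (p.2 :: ((pvSpan (p.2 - p.1) ps).1.map (·.2))) :: pvGroups (pvSpan (p.2 - p.1) ps).2
termination_by l => l.length
decreasing_by exact Nat.lt_succ_of_le (pvSpan_snd_length _ _)

def group_neighboring_lines_alt (line_nums : List Int) : List (List Int) :=
  pvGroups (PySem.List.enumerate line_nums 0)

-- ===== PRECONDITION & SPEC =====
def Spec_group_neighboring_lines (line_nums : List Int) (out : List (List Int)) : Prop := out = group_neighboring_lines_alt line_nums
instance (line_nums : List Int) (out : List (List Int)) : Decidable (Spec_group_neighboring_lines line_nums out) := by unfold Spec_group_neighboring_lines; infer_instance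

-- ===== CLAIM (what is proved, stated in full; the proofs are below) =====
def Claim_equal_group_neighboring_lines : Prop := ∀ (line_nums : List Int), Dom_group_neighboring_lines line_nums → Spec_group_neighboring_lines line_nums (group_neighboring_lines line_nums)

-- ===== LEMMAS AND PROOFS =====

-- reference recursion: split one maximal consecutive run off the front
def chainSplit (prev : Int) : List Int → List Int × List Int
  | [] => ([], [])
  | y :: ys =>
    if y = prev + 1 then
      let r := chainSplit y ys
      (y :: r.1, r.2)
    else ([], y :: ys)

theorem chainSplit_snd_length (prev : Int) (ys : List Int) :
    (chainSplit prev ys).2.length ≤ ys.length := by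
  induction ys generalizing prev with
  | nil => simp [chainSplit]
  | cons y ys ih =>
    simp only [chainSplit]
    split
    · exact le_trans (ih y) (Nat.le_succ _)
    · simp

-- reference recursion: the grouping both programs compute
def specF (prev : Int) (cur : List Int) : List Int → List (List Int)
  | [] => [cur]
  | y :: ys => if y = prev + 1 then specF y (cur ++ [y]) ys else cur :: specF y [y] ys

theorem A_loop (l : List Int) (m : Nat) : ∀ (k : Nat) (res : List (List Int)) (cur : List Int)
    (prev : Int), l.length - k ≤ m → 1 ≤ k → k ≤ l.length → l.getD (k - 1) 0 = prev →
    (let st := (PySem.List.pyRange (k : Int) (l.length : Int) 1).foldl (stepA l) (res, cur)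
     st.1 ++ [st.2]) = res ++ specF prev cur (l.drop k) := by
  induction m with
  | zero =>
    intro k res cur prev hm h1 hk hp
    have hkl : k = l.length := by omega
    have hnil : PySem.List.pyRange (k : Int) (l.length : Int) 1 = [] :=
      PySem.List.pyRange_one_eq_nil (by omega)
    rw [hnil]
    rw [List.drop_of_length_le (by omega)]
    simp [specF]
  | succ m ihm =>
    intro k res cur prev hm h1 hk hp
    by_cases hlt : k < l.length
    · rw [PySem.List.pyRange_one_cons (by omega), List.foldl_cons]
      have hgk : PySem.List.pyGetD l (k : Int) 0 = l.getD k 0 := by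
        simp [PySem.List.pyGetD_natCast]
      have hc1 : ((k : Int) - 1) = ((k - 1 : Nat) : Int) := by omega
      have hgk1 : PySem.List.pyGetD l ((k : Int) - 1) 0 = prev := by
        rw [hc1]
        simp only [PySem.List.pyGetD_natCast]
        exact hp
      have hc2 : ((k : Int) + 1) = ((k + 1 : Nat) : Int) := by omega
      have hdrop : l.drop k = l.getD k 0 :: l.drop (k + 1) := by
        rw [List.getD_eq_getElem l 0 hlt]
        exact (List.getElem_cons_drop hlt).symm
      rw [hdrop]
      simp only [stepA, hgk, hgk1, specF]
      by_cases hy : l.getD k 0 = prev + 1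
      · rw [if_pos hy, if_pos hy, hc2,
          ihm (k + 1) res (cur ++ [l.getD k 0]) (l.getD k 0) (by omega) (by omega) (by omega)
            (by simp)]
      · rw [if_neg hy, if_neg hy, hc2,
          ihm (k + 1) (res ++ [cur]) [l.getD k 0] (l.getD k 0) (by omega) (by omega) (by omega)
            (by simp)]
        simp
    · have hnil : PySem.List.pyRange (k : Int) (l.length : Int) 1 = [] :=
        PySem.List.pyRange_one_eq_nil (by omega)
      rw [hnil]
      rw [List.drop_of_length_le (by omega)]
      simp [specF]

theorem span_enum (ys : List Int) : ∀ (i prev : Int),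
    pvSpan (prev - (i - 1)) (PySem.List.enumerate ys i)
      = (PySem.List.enumerate (chainSplit prev ys).1 i,
         PySem.List.enumerate (chainSplit prev ys).2 (i + (chainSplit prev ys).1.length)) := by
  induction ys with
  | nil => intro i prev; simp [chainSplit, pvSpan, PySem.List.enumerate]
  | cons y ys ih =>
    intro i prev
    rw [PySem.List.enumerate_cons]
    by_cases h : y = prev + 1
    · have hk : (i, y).2 - (i, y).1 = prev - (i - 1) := by simp; omega
      have hk2 : prev - (i - 1) = y - ((i + 1) - 1) := by omega
      simp only [pvSpan, hk, if_true]
      rw [hk2, ih (i + 1) y]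
      simp only [chainSplit, if_pos h, PySem.List.enumerate_cons]
      have hoff : i + ((y :: (chainSplit y ys).1).length : Int)
          = i + 1 + ((chainSplit y ys).1.length : Int) := by
        simp only [List.length_cons]
        push_cast
        ring
      rw [hoff]
    · have hk : ¬ ((i, y).2 - (i, y).1 = prev - (i - 1)) := by simp; omega
      simp only [pvSpan, if_neg hk]
      simp only [chainSplit, if_neg h]
      simp [PySem.List.enumerate_cons]

theorem specF_chain (ys : List Int) : ∀ (prev : Int) (cur : List Int),
    specF prev cur ys =
      match chainSplit prev ys with
      | (g, []) => [cur ++ g]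
      | (g, z :: zs) => (cur ++ g) :: specF z [z] zs := by
  induction ys with
  | nil => intro prev cur; simp [chainSplit, specF]
  | cons y ys ih =>
    intro prev cur
    by_cases h : y = prev + 1
    · simp only [specF, if_pos h, chainSplit]
      rw [ih y (cur ++ [y])]
      rcases hc : chainSplit y ys with ⟨g, r⟩
      cases r <;> simp
    · simp only [specF, if_neg h, chainSplit]
      simp

theorem B_main (n : Nat) : ∀ (xs : List Int), xs.length ≤ n → ∀ (x i : Int),
    pvGroups (PySem.List.enumerate (x :: xs) i) = specF x [x] xs := by
  induction n with
  | zero =>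
    intro xs hxs x i
    have : xs = [] := by cases xs <;> simp_all
    subst this
    simp [PySem.List.enumerate, pvGroups, pvSpan, specF]
  | succ n ih =>
    intro xs hxs x i
    rw [PySem.List.enumerate_cons, pvGroups]
    have hk : (i, x).2 - (i, x).1 = x - ((i + 1) - 1) := by simp
    rw [hk, span_enum xs (i + 1) x]
    rw [specF_chain xs x [x]]
    rcases hc : chainSplit x xs with ⟨g, r⟩
    have hr : r.length ≤ xs.length := by
      have := chainSplit_snd_length x xs
      rw [hc] at this
      exact this
    cases r with
    | nil => simp [PySem.List.enumerate, pvGroups, PySem.List.map_snd_enumerate]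
    | cons z zs =>
      rw [PySem.List.enumerate_cons, pvGroups]
      have hk2 : ((i + 1) + (g.length : Int), z).2 - ((i + 1) + (g.length : Int), z).1
          = z - (((i + 1) + (g.length : Int) + 1) - 1) := by simp
      rw [hk2, span_enum zs ((i + 1) + (g.length : Int) + 1) z]
      simp only [PySem.List.map_snd_enumerate]
      have hzs : zs.length ≤ n := by simp at hr; omega
      have := ih zs hzs z ((i + 1) + (g.length : Int))
      rw [PySem.List.enumerate_cons, pvGroups, hk2, span_enum zs ((i + 1) + (g.length : Int) + 1) z] at this
      simp only [PySem.List.map_snd_enumerate] at this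
      rw [this]
      simp

-- ===== VERDICT (by name: the statement is the Claim_ definition above) =====
theorem group_neighboring_lines_spec : Claim_equal_group_neighboring_lines := by
  intro line_nums _
  unfold Spec_group_neighboring_lines group_neighboring_lines group_neighboring_lines_alt
  match line_nums with
  | [] => simp [PySem.List.enumerate, pvGroups]
  | x :: xs =>
    have h := A_loop (x :: xs) (x :: xs).length 1 [] [x] x (by omega) le_rfl (by simp) (by simp)
    simp only [Nat.cast_one, List.drop_one, List.tail_cons, List.nil_append] at h
    show ((PySem.List.pyRange 1 ((x :: xs).length : Int) 1).foldl (stepA (x :: xs)) ([], [x])).1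
        ++ [((PySem.List.pyRange 1 ((x :: xs).length : Int) 1).foldl (stepA (x :: xs)) ([], [x])).2]
      = pvGroups (PySem.List.enumerate (x :: xs) 0)
    rw [h]
    exact (B_main xs.length xs le_rfl x 0).symm
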